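-- pv_equiv track=rewrite | github.com/jazzm0/AoC2019 | day4/day4.py | part_one
-- ===== SOURCE A (Python) =====
-- def part_one(n):
--     contains = False
--     c = str(n)
--     for i in range(len(c) - 1):
--         if not contains and c[i] == c[i + 1]:
--             contains = True
--         if c[i] > c[i + 1]:
--             return False
--     return contains
-- ===== SOURCE B (Python) =====
-- def part_one(n):
--     c = str(n)
--     non_decreasing = (c == ''.join(sorted(c)))
--     has_pair = any(a == b for a, b in zip(c, c[1:]))
--     return non_decreasing and has_pair
-- ===== Notes on version B (the rewrite author's own statement) =====
-- stated objective: simpler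
-- what changed: Replaces A's single fused index loop with early return by two independent whole-string passes: non-decreasing tested as equality with the sorted copy, and an adjacent-equal pair tested with any over zip(c, c[1:]).
import Mathlib
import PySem

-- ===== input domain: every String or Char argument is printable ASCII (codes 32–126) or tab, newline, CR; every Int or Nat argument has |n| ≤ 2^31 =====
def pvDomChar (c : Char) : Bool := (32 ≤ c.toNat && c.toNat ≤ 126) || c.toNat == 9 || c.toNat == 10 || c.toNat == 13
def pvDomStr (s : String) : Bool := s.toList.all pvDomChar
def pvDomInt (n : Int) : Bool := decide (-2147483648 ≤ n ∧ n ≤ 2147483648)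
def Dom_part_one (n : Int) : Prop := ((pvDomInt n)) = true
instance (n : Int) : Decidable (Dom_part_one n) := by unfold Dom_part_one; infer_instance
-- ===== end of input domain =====

-- B replaces A's fused scan with two separate passes (sorted-equality + zip/any); objective: simpler.

-- ===== PORT A =====
-- the for-loop over i in range(len(c)-1), carrying 'contains', with the early 'return False'
def part_one_loop : List Char → Bool → Bool
  | x :: y :: rest, contains =>
    let contains := if !contains && x == y then true else contains
    if x > y then false else part_one_loop (y :: rest) contains
  | _, contains => contains

def part_one (n : Int) : Bool :=
  part_one_loop (PySem.Int.toChars n) false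

-- ===== PORT B =====
def part_one_alt (n : Int) : Bool :=
  let c := PySem.Int.toChars n
  let nonDecreasing := c == PySem.List.sorted c (fun x => x) false
  let hasPair := (c.zip c.tail).any (fun p => p.1 == p.2)
  nonDecreasing && hasPair

-- ===== PRECONDITION & SPEC =====
def Spec_part_one (n : Int) (out : Bool) : Prop := out = part_one_alt n
instance (n : Int) (out : Bool) : Decidable (Spec_part_one n out) := by unfold Spec_part_one; infer_instance

-- ===== CLAIM (what is proved, stated in full; the proofs are below) =====
def Claim_equal_part_one : Prop := ∀ (n : Int), Dom_part_one n → Spec_part_one n (part_one n)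

-- ===== LEMMAS AND PROOFS =====

-- boolean adjacent non-decreasing test (proof-only helper)
def ndB : List Char → Bool
  | x :: y :: r => decide (x ≤ y) && ndB (y :: r)
  | _ => true

theorem ndB_iff_pairwise (c : List Char) : ndB c = true ↔ List.Pairwise (· ≤ ·) c := by
  induction c with
  | nil => simp [ndB]
  | cons x t ih =>
    cases t with
    | nil => simp [ndB]
    | cons y r =>
      rw [ndB, List.pairwise_cons]
      simp only [Bool.and_eq_true, decide_eq_true_eq, ih, List.pairwise_cons] at *
      constructor
      · rintro ⟨hxy, hyr, hr⟩
        refine ⟨?_, hyr, hr⟩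
        intro z hz
        rcases List.mem_cons.mp hz with rfl | hz
        · exact hxy
        · exact le_trans hxy (hyr z hz)
      · rintro ⟨hall, hyr, hr⟩
        exact ⟨hall y (List.mem_cons_self ..), hyr, hr⟩

-- characterisation of A's loop: non-decreasing check times (carry or an adjacent pair)
theorem part_one_loop_eq (c : List Char) (b : Bool) :
    part_one_loop c b = (ndB c && (b || (c.zip c.tail).any (fun p => p.1 == p.2))) := by
  induction c generalizing b with
  | nil => simp [part_one_loop, ndB]
  | cons x t ih =>
    cases t with
    | nil => simp [part_one_loop, ndB]
    | cons y r =>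
      rw [part_one_loop, ndB]
      by_cases hxy : x > y
      · simp [hxy, not_le_of_gt hxy]
      · have hle : x ≤ y := le_of_not_gt hxy
        rw [if_neg (by simpa using hxy), ih]
        simp only [hle, decide_true, Bool.true_and, List.zip_cons_cons, List.tail_cons,
          List.any_cons]
        by_cases he : x = y
        · simp [he]
        · have hne : (x == y) = false := beq_eq_false_iff_ne.mpr he
          simp [hne]

theorem sorted_eq_ndB (c : List Char) :
    (c == PySem.List.sorted c (fun x => x) false) = ndB c := by
  by_cases hc : c = PySem.List.sorted c (fun x => x) false
  · have h : ndB c = true := (ndB_iff_pairwise c).mpr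
      (by rw [hc]; simpa using PySem.List.sorted_pairwise c (fun x => x))
    rw [h]
    simp only [beq_iff_eq]
    exact hc
  · have h : ndB c = false := by
      rcases Bool.eq_false_or_eq_true (ndB c) with h | h
      · exact absurd ((PySem.List.sorted_eq_self_of_pairwise c (fun x => x)
          (by simpa using (ndB_iff_pairwise c).mp h)).symm) hc
      · exact h
    rw [h, beq_eq_false_iff_ne]
    exact hc

-- ===== VERDICT (by name: the statement is the Claim_ definition above) =====
theorem part_one_spec : Claim_equal_part_one := by
  intro n _
  show part_one n = part_one_alt n
  simp only [part_one, part_one_alt]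
  rw [part_one_loop_eq, sorted_eq_ndB]
  simp
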